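-- pv_equiv track=rewrite | github.com/VelrajMurugesan/OpenEnv-Hackathon | app/graders.py | _fields_are_equivalent
-- ===== SOURCE A (Python) =====
-- def _fields_are_equivalent(f1: str, f2: str) -> bool:
--     """Check if two field names refer to the same thing."""
--     equivalences = [
--         {"supplier_gstin", "gstin", "supplier_gst"},
--         {"recipient_gstin", "recipient_gst", "buyer_gstin"},
--         {"invoice_number", "inv_number", "invoice_no"},
--         {"invoice_date", "date", "inv_date"},
--         {"tax_rate", "rate", "gst_rate"},
--         {"tax_type", "igst", "cgst", "sgst", "tax_category"},
--         {"eway_bill_number", "eway_bill", "e_way_bill", "eway"},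
--         {"total_invoice_value", "invoice_total", "total_value", "grand_total"},
--         {"total_taxable_value", "taxable_total", "subtotal"},
--         {"total_tax", "tax_total", "total_gst"},
--         {"reverse_charge", "rcm", "reverse_charge_mechanism"},
--         {"is_composition_scheme", "composition_scheme", "composition"},
--         {"hsn_code", "hsn", "sac_code", "sac"},
--         {"place_of_supply", "pos", "supply_place"},
--     ]
--     for group in equivalences:
--         if f1 in group and f2 in group:
--             return True
--     return False
-- ===== SOURCE B (Python) =====
-- # Flat name -> group-id table written out once; the body is two dict lookups,
-- # guarded so that two misses do not compare equal.
-- _GROUP_OF = {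
--     "supplier_gstin": 0, "gstin": 0, "supplier_gst": 0,
--     "recipient_gstin": 1, "recipient_gst": 1, "buyer_gstin": 1,
--     "invoice_number": 2, "inv_number": 2, "invoice_no": 2,
--     "invoice_date": 3, "date": 3, "inv_date": 3,
--     "tax_rate": 4, "rate": 4, "gst_rate": 4,
--     "tax_type": 5, "igst": 5, "cgst": 5, "sgst": 5, "tax_category": 5,
--     "eway_bill_number": 6, "eway_bill": 6, "e_way_bill": 6, "eway": 6,
--     "total_invoice_value": 7, "invoice_total": 7, "total_value": 7, "grand_total": 7,
--     "total_taxable_value": 8, "taxable_total": 8, "subtotal": 8,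
--     "total_tax": 9, "tax_total": 9, "total_gst": 9,
--     "reverse_charge": 10, "rcm": 10, "reverse_charge_mechanism": 10,
--     "is_composition_scheme": 11, "composition_scheme": 11, "composition": 11,
--     "hsn_code": 12, "hsn": 12, "sac_code": 12, "sac": 12,
--     "place_of_supply": 13, "pos": 13, "supply_place": 13,
-- }
--
--
-- def _fields_are_equivalent(f1: str, f2: str) -> bool:
--     """Check if two field names refer to the same thing."""
--     g = _GROUP_OF.get(f1)
--     return g is not None and g == _GROUP_OF.get(f2)
-- ===== Notes on version B (the rewrite author's own statement) =====
-- stated objective: simpler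
-- what changed: Replaces the per-call scan over 14 sets (two membership tests each) with a flat name-to-group-id dict literal; the body is just two lookups, guarded so two misses do not compare equal.
import Mathlib
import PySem

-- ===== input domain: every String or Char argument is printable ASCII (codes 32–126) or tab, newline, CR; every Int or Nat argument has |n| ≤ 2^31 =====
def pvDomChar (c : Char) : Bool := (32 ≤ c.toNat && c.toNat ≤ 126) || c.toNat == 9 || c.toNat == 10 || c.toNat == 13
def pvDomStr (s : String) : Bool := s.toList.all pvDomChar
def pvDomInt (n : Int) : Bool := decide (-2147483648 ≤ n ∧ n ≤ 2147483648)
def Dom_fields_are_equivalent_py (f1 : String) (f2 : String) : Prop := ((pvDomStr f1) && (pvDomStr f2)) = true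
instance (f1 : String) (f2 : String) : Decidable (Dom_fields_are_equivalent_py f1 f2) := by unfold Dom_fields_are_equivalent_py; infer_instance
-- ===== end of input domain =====

set_option maxRecDepth 8000

-- B replaces A's per-call scan over 14 equivalence sets by a flat name→group-id
-- dict literal, so the body is two lookups (guarded against a double miss).

-- ===== PORT A =====
def groupsA : List (PySem.Set String) :=
  [ PySem.Set.ofList ["supplier_gstin", "gstin", "supplier_gst"],
    PySem.Set.ofList ["recipient_gstin", "recipient_gst", "buyer_gstin"],
    PySem.Set.ofList ["invoice_number", "inv_number", "invoice_no"],
    PySem.Set.ofList ["invoice_date", "date", "inv_date"],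
    PySem.Set.ofList ["tax_rate", "rate", "gst_rate"],
    PySem.Set.ofList ["tax_type", "igst", "cgst", "sgst", "tax_category"],
    PySem.Set.ofList ["eway_bill_number", "eway_bill", "e_way_bill", "eway"],
    PySem.Set.ofList ["total_invoice_value", "invoice_total", "total_value", "grand_total"],
    PySem.Set.ofList ["total_taxable_value", "taxable_total", "subtotal"],
    PySem.Set.ofList ["total_tax", "tax_total", "total_gst"],
    PySem.Set.ofList ["reverse_charge", "rcm", "reverse_charge_mechanism"],
    PySem.Set.ofList ["is_composition_scheme", "composition_scheme", "composition"],
    PySem.Set.ofList ["hsn_code", "hsn", "sac_code", "sac"],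
    PySem.Set.ofList ["place_of_supply", "pos", "supply_place"] ]

-- the 'for group in equivalences: if f1 in group and f2 in group: return True' loop
def goA : List (PySem.Set String) → String → String → Bool
  | [], _, _ => false
  | g :: rest, f1, f2 =>
      if PySem.Set.contains g f1 && PySem.Set.contains g f2 then true else goA rest f1 f2

def fields_are_equivalent_py (f1 : String) (f2 : String) : Bool := goA groupsA f1 f2

-- ===== PORT B =====
-- _GROUP_OF: a flat dict literal, field name → group id
def tableB : PySem.Dict String Int := PySem.Dict.ofList
  [ ("supplier_gstin", 0), ("gstin", 0), ("supplier_gst", 0),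
    ("recipient_gstin", 1), ("recipient_gst", 1), ("buyer_gstin", 1),
    ("invoice_number", 2), ("inv_number", 2), ("invoice_no", 2),
    ("invoice_date", 3), ("date", 3), ("inv_date", 3),
    ("tax_rate", 4), ("rate", 4), ("gst_rate", 4),
    ("tax_type", 5), ("igst", 5), ("cgst", 5), ("sgst", 5), ("tax_category", 5),
    ("eway_bill_number", 6), ("eway_bill", 6), ("e_way_bill", 6), ("eway", 6),
    ("total_invoice_value", 7), ("invoice_total", 7), ("total_value", 7), ("grand_total", 7),
    ("total_taxable_value", 8), ("taxable_total", 8), ("subtotal", 8),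
    ("total_tax", 9), ("tax_total", 9), ("total_gst", 9),
    ("reverse_charge", 10), ("rcm", 10), ("reverse_charge_mechanism", 10),
    ("is_composition_scheme", 11), ("composition_scheme", 11), ("composition", 11),
    ("hsn_code", 12), ("hsn", 12), ("sac_code", 12), ("sac", 12),
    ("place_of_supply", 13), ("pos", 13), ("supply_place", 13) ]

def fields_are_equivalent_py_alt (f1 : String) (f2 : String) : Bool :=
  match PySem.Dict.get? tableB f1 with
  | none => false
  | some g => some g == PySem.Dict.get? tableB f2

-- ===== PRECONDITION & SPEC =====
def Spec_fields_are_equivalent_py (f1 : String) (f2 : String) (out : Bool) : Prop := out = fields_are_equivalent_py_alt f1 f2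
instance (f1 : String) (f2 : String) (out : Bool) : Decidable (Spec_fields_are_equivalent_py f1 f2 out) := by unfold Spec_fields_are_equivalent_py; infer_instance

-- ===== CLAIM =====
def Claim_equal_fields_are_equivalent_py : Prop := ∀ (f1 : String) (f2 : String), Dom_fields_are_equivalent_py f1 f2 → Spec_fields_are_equivalent_py f1 f2 (fields_are_equivalent_py f1 f2)

-- ===== LEMMAS AND PROOFS =====

-- all field names, in the order the groups list them
def fieldNames : List String :=
  ["supplier_gstin", "gstin", "supplier_gst",
   "recipient_gstin", "recipient_gst", "buyer_gstin",
   "invoice_number", "inv_number", "invoice_no",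
   "invoice_date", "date", "inv_date",
   "tax_rate", "rate", "gst_rate",
   "tax_type", "igst", "cgst", "sgst", "tax_category",
   "eway_bill_number", "eway_bill", "e_way_bill", "eway",
   "total_invoice_value", "invoice_total", "total_value", "grand_total",
   "total_taxable_value", "taxable_total", "subtotal",
   "total_tax", "tax_total", "total_gst",
   "reverse_charge", "rcm", "reverse_charge_mechanism",
   "is_composition_scheme", "composition_scheme", "composition",
   "hsn_code", "hsn", "sac_code", "sac",
   "place_of_supply", "pos", "supply_place"]

lemma goA_eq_any (gs : List (PySem.Set String)) (f1 f2 : String) :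
    goA gs f1 f2 = gs.any (fun g => PySem.Set.contains g f1 && PySem.Set.contains g f2) := by
  induction gs with
  | nil => rfl
  | cons g rest ih =>
      simp only [goA, List.any_cons, ← ih]
      cases h : (PySem.Set.contains g f1 && PySem.Set.contains g f2) <;> simp_all

lemma groupsA_sub : ∀ g ∈ groupsA, ∀ x ∈ g, x ∈ fieldNames := by decide

lemma tableB_keys : tableB.keys = fieldNames := by decide

lemma get?_tableB_none (f : String) (h : f ∉ fieldNames) : PySem.Dict.get? tableB f = none := by
  rw [PySem.Dict.get?_eq_none_iff_not_mem_keys, tableB_keys]; exact h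

lemma A_false_of_not_mem_left (f1 f2 : String) (h : f1 ∉ fieldNames) :
    fields_are_equivalent_py f1 f2 = false := by
  unfold fields_are_equivalent_py
  rw [goA_eq_any, List.any_eq_false]
  intro g hg hc
  rw [Bool.and_eq_true, PySem.Set.contains_iff, PySem.Set.contains_iff] at hc
  exact h (groupsA_sub g hg f1 hc.1)

lemma A_false_of_not_mem_right (f1 f2 : String) (h : f2 ∉ fieldNames) :
    fields_are_equivalent_py f1 f2 = false := by
  unfold fields_are_equivalent_py
  rw [goA_eq_any, List.any_eq_false]
  intro g hg hc
  rw [Bool.and_eq_true, PySem.Set.contains_iff, PySem.Set.contains_iff] at hc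
  exact h (groupsA_sub g hg f2 hc.2)

lemma B_false_of_not_mem_left (f1 f2 : String) (h : f1 ∉ fieldNames) :
    fields_are_equivalent_py_alt f1 f2 = false := by
  unfold fields_are_equivalent_py_alt
  rw [get?_tableB_none f1 h]

lemma B_false_of_not_mem_right (f1 f2 : String) (h : f2 ∉ fieldNames) :
    fields_are_equivalent_py_alt f1 f2 = false := by
  unfold fields_are_equivalent_py_alt
  cases hg : PySem.Dict.get? tableB f1 with
  | none => rfl
  | some g => simp [get?_tableB_none f2 h]

lemma both_mem :
    ∀ f1 ∈ fieldNames, ∀ f2 ∈ fieldNames,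
      fields_are_equivalent_py f1 f2 = fields_are_equivalent_py_alt f1 f2 := by decide

-- ===== VERDICT =====
theorem fields_are_equivalent_py_spec : Claim_equal_fields_are_equivalent_py := by
  intro f1 f2 _
  unfold Spec_fields_are_equivalent_py
  by_cases h1 : f1 ∈ fieldNames
  · by_cases h2 : f2 ∈ fieldNames
    · exact both_mem f1 h1 f2 h2
    · rw [A_false_of_not_mem_right f1 f2 h2, B_false_of_not_mem_right f1 f2 h2]
  · rw [A_false_of_not_mem_left f1 f2 h1, B_false_of_not_mem_left f1 f2 h1]
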